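-- pv_equiv track=rewrite | github.com/semanticmx/coding-practice-patterns | list_manipulation/kids-n-candies/main.py | execute
-- ===== SOURCE A (Python) =====
-- from dataclasses import dataclass
--
-- @dataclass
-- class ExerciseOptions:
--     result_cache: dict
--     candies: list
--     result: list
--     extra_candies: int = 0
--     greatest: int = 0
--
--     def update_result(self, index:int):
--         if index in self.result_cache.keys():
--             self.result[index] = self.result_cache[index]
--             return
--         # check if candies + extra_candies is greater than or equal the greatest
--         self.result[index] = (self.candies[index] + self.extra_candies) >= self.greatest
--         self.result_cache[index] = self.result[index]
--
-- def execute(candies: list, extra_candies: int) -> list: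
--     """
--
--     :param candies:
--     :param extra_candies:
--     :return:
--     """
--     options = ExerciseOptions(
--         result_cache={},
--         candies=candies,
--         result=[False] * len(candies),
--         extra_candies=extra_candies,
--     )
--     n = len(options.candies)
--     for init in range(n):
--         # calculate opposite index based on init value
--         end = n - init - 1
--         if init <= end:
--             options.greatest = max(
--                 options.greatest,
--                 candies[init],
--                 candies[end],
--             )
--
--         if init >= end:
--             options.update_result(index=init)
--             options.update_result(index=end)
--
--     return options.result
-- ===== SOURCE B (Python) =====
-- def execute(candies: list, extra_candies: int) -> list:
--     """Two plain passes: compute the threshold, then mark each kid."""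
--     greatest = max([0, *candies])
--     return [c + extra_candies >= greatest for c in candies]
-- ===== Notes on version B (the rewrite author's own statement) =====
-- stated objective: simpler
-- what changed: Replaced the dataclass with mutable state, per-index result cache and interleaved two-pointer loop by two plain passes: one max() over [0, *candies] for the threshold, then a comprehension marking each kid.
import Mathlib
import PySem

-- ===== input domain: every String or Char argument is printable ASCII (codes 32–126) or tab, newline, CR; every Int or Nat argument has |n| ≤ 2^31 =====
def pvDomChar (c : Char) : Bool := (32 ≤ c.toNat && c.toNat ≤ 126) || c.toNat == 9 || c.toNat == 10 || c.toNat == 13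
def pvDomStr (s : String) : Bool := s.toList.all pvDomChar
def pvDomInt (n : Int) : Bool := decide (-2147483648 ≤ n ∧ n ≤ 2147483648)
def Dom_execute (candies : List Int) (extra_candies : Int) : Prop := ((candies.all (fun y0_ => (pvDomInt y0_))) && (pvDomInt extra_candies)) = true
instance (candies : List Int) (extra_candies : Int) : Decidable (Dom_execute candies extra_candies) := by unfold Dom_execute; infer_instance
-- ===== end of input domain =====

-- B replaces A's dataclass state, per-index result cache and interleaved two-pointer loop
-- by two plain passes (a max() for the threshold, then a comprehension): simpler, same O(n) cost.

-- ===== PORT A =====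
-- the dataclass ExerciseOptions (candies/extra_candies are passed separately, they never change)
structure ExOptions where
  cache : PySem.Dict Int Bool
  result : List Bool
  greatest : Int

-- ExerciseOptions.update_result
def updateResult (candies : List Int) (extra_candies : Int) (o : ExOptions) (index : Int) : ExOptions :=
  if o.cache.contains index then
    { o with result := PySem.List.pySetD o.result index (o.cache.getD index false) }
  else
    let v := decide (PySem.List.pyGetD candies index 0 + extra_candies ≥ o.greatest)
    { o with result := PySem.List.pySetD o.result index v,
             cache := o.cache.insert index v }

-- the body of A's for-loop
def stepA (candies : List Int) (extra_candies : Int) (n : Int) (o : ExOptions) (init : Int) : ExOptions :=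
  let e := n - init - 1
  let o1 := if init ≤ e then
      { o with greatest := max (max o.greatest (PySem.List.pyGetD candies init 0))
                               (PySem.List.pyGetD candies e 0) }
    else o
  if init ≥ e then updateResult candies extra_candies (updateResult candies extra_candies o1 init) e
  else o1

def execute (candies : List Int) (extra_candies : Int) : List Bool :=
  let n : Int := PySem.List.len candies
  ((PySem.List.pyRange 0 n 1).foldl (stepA candies extra_candies n)
    ⟨PySem.Dict.empty, List.replicate candies.length false, 0⟩).result

-- ===== PORT B =====
def execute_alt (candies : List Int) (extra_candies : Int) : List Bool :=
  let greatest := ((PySem.List.max? (0 :: candies) (fun y => y)).getD 0)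
  candies.map (fun c => decide (c + extra_candies ≥ greatest))

-- ===== PRECONDITION & SPEC =====
def Spec_execute (candies : List Int) (extra_candies : Int) (out : List Bool) : Prop := out = execute_alt candies extra_candies
instance (candies : List Int) (extra_candies : Int) (out : List Bool) : Decidable (Spec_execute candies extra_candies out) := by unfold Spec_execute; infer_instance

-- ===== CLAIM (what is proved, stated in full; the proofs are below) =====
def Claim_equal_execute : Prop := ∀ (candies : List Int) (extra_candies : Int), Dom_execute candies extra_candies → Spec_execute candies extra_candies (execute candies extra_candies)

-- ===== LEMMAS AND PROOFS =====

def gAcc (c : List Int) (j : Nat) : Int :=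
  (List.range j).foldl (fun g k => max (max g (c.getD k 0)) (c.getD (c.length - 1 - k) 0)) 0

theorem gAcc_succ (c : List Int) (j : Nat) :
    gAcc c (j+1) = max (max (gAcc c j) (c.getD j 0)) (c.getD (c.length - 1 - j) 0) := by
  simp [gAcc, List.range_succ]

theorem getD_le_M (c : List Int) (k : Nat) : c.getD k 0 ≤ c.foldl max 0 := by
  by_cases h : k < c.length
  · rw [List.getD_eq_getElem c 0 h]
    exact (PySem.List.le_foldl_max c 0).2 _ (List.getElem_mem h)
  · rw [List.getD_eq_default c 0 (by omega)]
    exact (PySem.List.le_foldl_max c 0).1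

theorem gAcc_le_M (c : List Int) (j : Nat) : gAcc c j ≤ c.foldl max 0 := by
  induction j with
  | zero => simpa [gAcc] using (PySem.List.le_foldl_max c 0).1
  | succ j ih =>
    rw [gAcc_succ]
    exact max_le (max_le ih (getD_le_M c j)) (getD_le_M c _)

theorem gAcc_mono (c : List Int) {j j' : Nat} (h : j ≤ j') : gAcc c j ≤ gAcc c j' := by
  induction j' with
  | zero => have : j = 0 := by omega
            simp [this]
  | succ j' ih =>
    rcases Nat.lt_or_ge j (j'+1) with h' | h'
    · refine le_trans (ih (by omega)) ?_
      rw [gAcc_succ]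
      exact le_trans (le_max_left _ _) (le_max_left _ _)
    · have : j = j' + 1 := by omega
      simp [this]

theorem le_gAcc_left (c : List Int) {j t : Nat} (h : j < t) : c.getD j 0 ≤ gAcc c t := by
  refine le_trans ?_ (gAcc_mono c (show j+1 ≤ t by omega))
  rw [gAcc_succ]
  exact le_trans (le_max_right _ _) (le_max_left _ _)

theorem le_gAcc_right (c : List Int) {j t : Nat} (h : j < t) :
    c.getD (c.length - 1 - j) 0 ≤ gAcc c t := by
  refine le_trans ?_ (gAcc_mono c (show j+1 ≤ t by omega))
  rw [gAcc_succ]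
  exact le_max_right _ _

theorem gAcc_nonneg (c : List Int) (j : Nat) : 0 ≤ gAcc c j := by
  have := gAcc_mono c (Nat.zero_le j)
  simpa [gAcc] using this

theorem gAcc_eq_M (c : List Int) : gAcc c ((c.length + 1) / 2) = c.foldl max 0 := by
  refine le_antisymm (gAcc_le_M c _) ?_
  rcases PySem.List.foldl_max_mem c 0 with h | h
  · rw [h]; exact gAcc_nonneg c _
  · obtain ⟨k, hk, hke⟩ := List.mem_iff_getElem.1 h
    rcases Nat.lt_or_ge k ((c.length + 1) / 2) with hlt | hge
    · calc c.foldl max 0 = c.getD k 0 := by rw [List.getD_eq_getElem c 0 hk, hke]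
        _ ≤ _ := le_gAcc_left c hlt
    · have hj : c.length - 1 - (c.length - 1 - k) = k := by omega
      calc c.foldl max 0 = c.getD (c.length - 1 - (c.length - 1 - k)) 0 := by
              rw [hj, List.getD_eq_getElem c 0 hk, hke]
        _ ≤ _ := le_gAcc_right c (show c.length - 1 - k < (c.length + 1) / 2 by omega)

theorem phase1 (c : List Int) (e : Int) (j : Nat) (hj : 2*j ≤ c.length) :
    (PySem.List.pyRange 0 (j:Int) 1).foldl (stepA c e (c.length : Int))
      ⟨PySem.Dict.empty, List.replicate c.length false, 0⟩
    = ⟨PySem.Dict.empty, List.replicate c.length false, gAcc c j⟩ := by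
  induction j with
  | zero => simp [PySem.List.pyRange_one_eq_nil, gAcc]
  | succ j ih =>
    have hcast : ((j+1 : Nat) : Int) = (j : Int) + 1 := by push_cast; ring
    rw [hcast, PySem.List.pyRange_one_succ_right (by positivity), List.foldl_append,
        ih (by omega)]
    simp only [List.foldl_cons, List.foldl_nil]
    simp only [stepA]
    have h1 : ((j:Int) ≤ (c.length:Int) - j - 1) := by omega
    have h2 : ¬ ((j:Int) ≥ (c.length:Int) - j - 1) := by omega
    rw [if_pos h1, if_neg h2]
    have hidx : ((c.length:Int) - j - 1) = ((c.length - 1 - j : Nat) : Int) := by omega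
    simp [hidx, PySem.List.pyGetD_natCast, gAcc_succ]

def fMark (c : List Int) (e : Int) (x : Int) : Bool := decide (x + e ≥ c.foldl max 0)

theorem midstep (c : List Int) (e : Int) (m : Nat) (hm : c.length = 2*m+1) :
    stepA c e (c.length:Int) ⟨PySem.Dict.empty, List.replicate c.length false, gAcc c m⟩ (m:Int)
    = ⟨PySem.Dict.empty.insert (m:Int) (decide (c.getD m 0 + e ≥ gAcc c (m+1))),
       (List.replicate c.length false).set m (decide (c.getD m 0 + e ≥ gAcc c (m+1))),
       gAcc c (m+1)⟩ := by
  have hgs : gAcc c (m+1) = max (max (gAcc c m) (c.getD m 0)) (c.getD m 0) := by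
    rw [gAcc_succ, show c.length - 1 - m = m by omega]
  simp only [stepA, updateResult]
  have he : (c.length:Int) - (m:Int) - 1 = (m:Int) := by omega
  rw [he, if_pos le_rfl, if_pos le_rfl]
  simp [PySem.Dict.contains_empty, PySem.Dict.contains_insert_self, PySem.Dict.getD_insert_self,
        PySem.List.pySetD_natCast, PySem.List.pyGetD_natCast, List.set_set, hgs]

theorem phase2 (c : List Int) (e : Int) (d : Nat) : ∀ (j : Nat) (o : ExOptions),
    j + d = c.length → c.length ≤ 2*j →
    o.greatest = c.foldl max 0 →
    (∀ q v, o.cache.get? q = some v → ((c.length - j : Nat) : Int) ≤ q ∧ q < (j:Int)) →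
    o.result.length = c.length →
    (∀ k, k < c.length → o.result[k]? =
        some (if c.length - j ≤ k ∧ k < j then fMark c e (c.getD k 0) else false)) →
    ((PySem.List.pyRange (j:Int) (c.length:Int) 1).foldl (stepA c e (c.length:Int)) o).result
      = c.map (fMark c e) := by
  induction d with
  | zero =>
    intro j o hjd _ _ _ hlen hres
    have hj : j = c.length := by omega
    subst hj
    rw [PySem.List.pyRange_one_eq_nil (le_refl _), List.foldl_nil]
    apply List.ext_getElem?
    intro k
    rcases Nat.lt_or_ge k c.length with hk | hk
    · rw [hres k hk, List.getElem?_map, if_pos (by omega), List.getElem?_eq_getElem hk,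
          List.getD_eq_getElem c 0 hk, Option.map_some]
    · rw [List.getElem?_eq_none (by omega), List.getElem?_eq_none (by simpa using hk)]
  | succ d ih =>
    intro j o hjd hj2 hg hc hlen hres
    have hjn : j < c.length := by omega
    rw [PySem.List.pyRange_one_cons (by exact_mod_cast hjn), List.foldl_cons]
    have hidx : ((c.length:Int) - (j:Int) - 1) = ((c.length - 1 - j : Nat) : Int) := by omega
    have hne : (c.length - 1 - j : Nat) ≠ j := by omega
    -- compute the step
    have hcj : o.cache.get? (j:Int) = none := by
      cases hq : o.cache.get? (j:Int) with
      | none => rfl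
      | some v => exact absurd ((hc _ _ hq).2) (by omega)
    have hce : o.cache.get? ((c.length - 1 - j : Nat) : Int) = none := by
      cases hq : o.cache.get? ((c.length - 1 - j : Nat) : Int) with
      | none => rfl
      | some v => exact absurd ((hc _ _ hq).1) (by omega)
    have hstep : stepA c e (c.length:Int) o (j:Int) =
        ⟨(o.cache.insert (j:Int) (fMark c e (c.getD j 0))).insert ((c.length - 1 - j : Nat) : Int)
            (fMark c e (c.getD (c.length - 1 - j) 0)),
         (o.result.set j (fMark c e (c.getD j 0))).set (c.length - 1 - j)
            (fMark c e (c.getD (c.length - 1 - j) 0)),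
         o.greatest⟩ := by
      simp only [stepA]
      rw [if_neg (show ¬ ((j:Int) ≤ (c.length:Int) - j - 1) by omega),
          if_pos (show ((j:Int) ≥ (c.length:Int) - j - 1) by omega), hidx]
      have hne' : ((c.length - 1 - j : Nat) : Int) ≠ (j:Int) := by exact_mod_cast hne
      simp [updateResult, PySem.Dict.contains_eq_isSome_get?, hcj,
            PySem.Dict.get?_insert_of_ne _ _ hne', hce,
            PySem.List.pySetD_natCast, PySem.List.pyGetD_natCast, hg, fMark]
    rw [hstep]
    have hcast : (j:Int) + 1 = ((j+1 : Nat) : Int) := by push_cast; ring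
    rw [hcast]
    apply ih (j+1)
    · omega
    · omega
    · exact hg
    · intro q v hq
      rw [PySem.Dict.get?_insert] at hq
      split_ifs at hq with h1
      · subst h1; constructor <;> omega
      · rw [PySem.Dict.get?_insert] at hq
        split_ifs at hq with h2
        · subst h2; constructor <;> omega
        · obtain ⟨hthis1, hthis2⟩ := hc _ _ hq
          constructor <;> omega
    · simpa using hlen
    · intro k hk
      rw [List.getElem?_set, List.getElem?_set]
      by_cases h1 : c.length - 1 - j = k
      · subst h1
        rw [if_pos rfl, if_pos (by simp only [List.length_set, hlen]; omega), if_pos (by omega)]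
      · rw [if_neg h1]
        by_cases h2 : j = k
        · subst h2
          rw [if_pos rfl, if_pos (by omega), if_pos (by omega)]
        · rw [if_neg h2, hres k hk]
          congr 1
          by_cases h3 : c.length - j ≤ k ∧ k < j
          · rw [if_pos h3, if_pos (by omega)]
          · rw [if_neg h3, if_neg (by omega)]

theorem execute_eq_map (c : List Int) (e : Int) :
    execute c e = c.map (fMark c e) := by
  simp only [execute, PySem.List.len_eq]
  rcases Nat.even_or_odd c.length with ⟨m, hm⟩ | ⟨m, hm⟩
  · -- even length: first half builds the max, second half writes
    rw [PySem.List.pyRange_one_append 0 (m:Int) (c.length:Int) (by positivity) (by omega),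
        List.foldl_append, phase1 c e m (by omega)]
    apply phase2 c e (c.length - m) m _ (by omega) (by omega)
    · show gAcc c m = c.foldl max 0
      rw [show m = (c.length + 1)/2 by omega]
      exact gAcc_eq_M c
    · intro q v hq
      rw [PySem.Dict.get?_empty] at hq
      exact absurd hq (by simp)
    · simp
    · intro k hk
      rw [List.getElem?_replicate, if_pos hk, if_neg (by omega)]
  · -- odd length: first half, then the middle index, then the writes
    have hM : gAcc c (m+1) = c.foldl max 0 := by
      rw [show m+1 = (c.length + 1)/2 by omega]; exact gAcc_eq_M c
    have hsplit : PySem.List.pyRange 0 (c.length:Int) 1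
        = (PySem.List.pyRange 0 (m:Int) 1 ++ [(m:Int)])
          ++ PySem.List.pyRange ((m+1:Nat):Int) (c.length:Int) 1 := by
      rw [← PySem.List.pyRange_one_succ_right (by positivity),
          show (m:Int) + 1 = ((m+1:Nat):Int) by omega,
          ← PySem.List.pyRange_one_append 0 ((m+1:Nat):Int) (c.length:Int) (by positivity) (by omega)]
    rw [hsplit, List.foldl_append, List.foldl_append, phase1 c e m (by omega),
        List.foldl_cons, List.foldl_nil, midstep c e m (by omega)]
    apply phase2 c e (c.length - (m+1)) (m+1) _ (by omega) (by omega)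
    · exact hM
    · intro q v hq
      rw [PySem.Dict.get?_insert] at hq
      split_ifs at hq with h1
      · subst h1; constructor <;> omega
      · rw [PySem.Dict.get?_empty] at hq
        exact absurd hq (by simp)
    · simp
    · intro k hk
      rw [List.getElem?_set, List.getElem?_replicate]
      by_cases h1 : m = k
      · subst h1
        rw [if_pos rfl, if_pos (by simp; omega), if_pos (by omega), hM]
        rfl
      · rw [if_neg h1, if_pos hk, if_neg (by omega)]

theorem execute_alt_eq_map (c : List Int) (e : Int) :
    execute_alt c e = c.map (fMark c e) := by
  simp only [execute_alt, PySem.List.max?_id_cons, Option.getD_some]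
  rfl

-- ===== VERDICT (by name: the statement is the Claim_ definition above) =====
theorem execute_spec : Claim_equal_execute := by
  intro candies extra_candies _
  show execute candies extra_candies = execute_alt candies extra_candies
  rw [execute_eq_map, execute_alt_eq_map]
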